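-- pv_equiv track=rewrite | github.com/sabdo4959/Catching-Smells | RQ3/gha-ci-detector_paper/src/gha_ci_detector/util.py | fill_dict
-- ===== SOURCE A (Python) =====
-- def fill_dict(mods: dict[int, int]) -> (list[int], list[int]):
--     if len(mods.keys()) == 0:
--         return [], []
--     time_stamps = [i for i in range(1, list(mods.keys())[-1])]
--     counts = []
--     last = 0
--     for el in time_stamps:
--         try:
--             last = mods[el] + last
--             counts.append(last)
--         except KeyError:
--             counts.append(last)
--     return counts, time_stamps
-- ===== SOURCE B (Python) =====
-- def fill_dict(mods: dict[int, int]) -> (list[int], list[int]):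
--     if not mods:
--         return [], []
--     last_key = next(reversed(mods))
--     time_stamps = list(range(1, last_key))
--     counts = [sum(v for k, v in mods.items() if 0 < k <= t) for t in time_stamps]
--     return counts, time_stamps
-- ===== Notes on version B (the rewrite author's own statement) =====
-- stated objective: alternative
-- what changed: Replaces A's stateful running-sum loop (accumulator carried across timestamps, try/except lookup) by a stateless direct definition: for each timestamp t, counts[t] is recomputed from scratch as the sum of all dict values whose key lies in (0, t]; no accumulator, no incremental state.
import Mathlib
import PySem

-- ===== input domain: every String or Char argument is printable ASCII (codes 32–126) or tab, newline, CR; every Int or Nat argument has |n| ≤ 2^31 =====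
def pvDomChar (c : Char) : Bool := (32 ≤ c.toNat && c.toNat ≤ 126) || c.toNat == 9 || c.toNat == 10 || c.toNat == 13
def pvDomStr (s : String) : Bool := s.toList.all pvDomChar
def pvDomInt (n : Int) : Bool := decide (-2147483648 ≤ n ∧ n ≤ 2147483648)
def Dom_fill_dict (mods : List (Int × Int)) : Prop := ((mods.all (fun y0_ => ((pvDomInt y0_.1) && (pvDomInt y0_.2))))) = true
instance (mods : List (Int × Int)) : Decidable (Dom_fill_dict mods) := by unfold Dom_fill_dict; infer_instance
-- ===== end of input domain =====

-- B drops A's running accumulator entirely: each count is recomputed from scratch as the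
-- sum of all dict values with key in (0, t]; objective: alternative (B does more work per step).

-- ===== PORT A =====
def fill_dict (mods : List (Int × Int)) : List Int × List Int :=
  let d := PySem.Dict.ofList mods
  if d.keys.length == 0 then ([], [])
  else
    -- list(mods.keys())[-1]; in range since keys is nonempty here
    let lastKey : Int := PySem.List.pyGetD d.keys (-1) 0
    let time_stamps := PySem.List.pyRange 1 lastKey 1
    let st := time_stamps.foldl (fun (st : Int × List Int) el =>
      match d.get? el with
      | some v => (v + st.1, st.2 ++ [v + st.1])       -- try branch
      | none   => (st.1, st.2 ++ [st.1])) (0, [])       -- except KeyError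
    (st.2, time_stamps)

-- ===== PORT B =====
def fill_dict_alt (mods : List (Int × Int)) : List Int × List Int :=
  let d := PySem.Dict.ofList mods
  if d.items.length == 0 then ([], [])
  else
    -- next(reversed(mods)); keys is nonempty here
    let lastKey : Int := d.keys.reverse.headD 0
    let time_stamps := PySem.List.pyRange 1 lastKey 1
    -- sum(v for k, v in mods.items() if 0 < k <= t), per timestamp
    let counts := time_stamps.map (fun t =>
      d.items.foldl (fun s kv => if 0 < kv.1 ∧ kv.1 ≤ t then s + kv.2 else s) 0)
    (counts, time_stamps)

-- ===== PRECONDITION & SPEC =====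
def Spec_fill_dict (mods : List (Int × Int)) (out : List Int × List Int) : Prop := out = fill_dict_alt mods
instance (mods : List (Int × Int)) (out : List Int × List Int) : Decidable (Spec_fill_dict mods out) := by unfold Spec_fill_dict; infer_instance

-- ===== CLAIM (what is proved, stated in full; the proofs are below) =====
def Claim_equal_fill_dict : Prop := ∀ (mods : List (Int × Int)), Dom_fill_dict mods → Spec_fill_dict mods (fill_dict mods)

-- ===== LEMMAS AND PROOFS =====

/-- cumulative sums with carry `a`: the mathematical description of A's fused loop. -/
def pvCum (a : Int) : List Int → List Int
  | [] => []
  | x :: xs => (a + x) :: pvCum (a + x) xs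

/-- A's fused loop: second component is `cs ++` the cumulative sums of the increments. -/
theorem aLoop_eq (d : PySem.Dict Int Int) (ts : List Int) :
    ∀ (l : Int) (cs : List Int),
    (ts.foldl (fun (st : Int × List Int) el =>
      match d.get? el with
      | some v => (v + st.1, st.2 ++ [v + st.1])
      | none   => (st.1, st.2 ++ [st.1])) (l, cs)).2
      = cs ++ pvCum l (ts.map (fun t => d.getD t 0)) := by
  induction ts with
  | nil => intro l cs; simp [pvCum]
  | cons t ts ih =>
    intro l cs
    simp only [List.foldl_cons, List.map_cons, pvCum]
    rcases h : d.get? t with _ | v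
    · have hg : d.getD t 0 = 0 := by simp [PySem.Dict.getD, h]
      simp only [hg, ih, Int.add_zero]
      simp
    · have hg : d.getD t 0 = v := by simp [PySem.Dict.getD, h]
      simp only [hg, ih, Int.add_comm v l]
      simp

/-- B's per-timestamp fold is a sum of mapped indicators. -/
theorem bFold_eq_sum (l : List (Int × Int)) (t : Int) : ∀ (s : Int),
    l.foldl (fun s kv => if 0 < kv.1 ∧ kv.1 ≤ t then s + kv.2 else s) s
      = s + (l.map (fun kv => if 0 < kv.1 ∧ kv.1 ≤ t then kv.2 else 0)).sum := by
  induction l with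
  | nil => intro s; simp
  | cons kv l ih =>
    intro s
    by_cases h : 0 < kv.1 ∧ kv.1 ≤ t
    · simp [h, ih]; ring
    · simp [h, ih]

/-- stepping the bound by one adds only the entries with key exactly t (t ≥ 1). -/
theorem sum_pred_step (l : List (Int × Int)) (t : Int) (ht : 1 ≤ t) :
    (l.map (fun kv => if 0 < kv.1 ∧ kv.1 ≤ t then kv.2 else 0)).sum
      = (l.map (fun kv => if 0 < kv.1 ∧ kv.1 ≤ t - 1 then kv.2 else 0)).sum
        + (l.map (fun kv => if kv.1 = t then kv.2 else 0)).sum := by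
  induction l with
  | nil => simp
  | cons kv l ih =>
    simp only [List.map_cons, List.sum_cons, ih]
    by_cases he : kv.1 = t
    · have h1 : 0 < kv.1 ∧ kv.1 ≤ t := ⟨by omega, by omega⟩
      have h2 : ¬ (0 < kv.1 ∧ kv.1 ≤ t - 1) := by omega
      simp only [if_pos h1, if_neg h2, if_pos he]
      ring
    · have h3 : (0 < kv.1 ∧ kv.1 ≤ t) ↔ (0 < kv.1 ∧ kv.1 ≤ t - 1) := by omega
      by_cases h1 : 0 < kv.1 ∧ kv.1 ≤ t
      · simp only [if_pos h1, if_pos (h3.mp h1), if_neg he]; ring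
      · simp only [if_neg h1, if_neg (fun h => h1 (h3.mpr h)), if_neg he]; ring

/-- on a list with Nodup keys, the key-equality sum is the dict lookup. -/
theorem sum_eq_key (d : PySem.Dict Int Int) (hnd : d.keys.Nodup) (t : Int) :
    (d.items.map (fun kv => if kv.1 = t then kv.2 else 0)).sum = d.getD t 0 := by
  rw [PySem.Dict.items_eq_map_keys d hnd 0, List.map_map]
  have hfun : ((fun kv : Int × Int => if kv.1 = t then kv.2 else 0) ∘ fun k => (k, d.getD k 0))
      = fun k => if k = t then d.getD k 0 else 0 := by
    funext k; by_cases hk : k = t <;> simp [hk]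
  rw [hfun]
  have aux : ∀ ks : List Int, ks.Nodup →
      (ks.map (fun k => if k = t then d.getD k 0 else 0)).sum
        = if t ∈ ks then d.getD t 0 else 0 := by
    intro ks
    induction ks with
    | nil => simp
    | cons k ks ihk =>
      intro hnk
      simp only [List.map_cons, List.sum_cons, ihk (List.nodup_cons.mp hnk).2]
      by_cases hk : k = t
      · subst hk
        have hnm : k ∉ ks := (List.nodup_cons.mp hnk).1
        simp [hnm]
      · by_cases hmem : t ∈ ks <;> simp [hk, hmem, (show t ≠ k from fun h => hk h.symm)]
  rw [aux d.keys hnd]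
  by_cases hm : t ∈ d.keys
  · simp [hm]
  · rw [if_neg hm]
    symm
    apply PySem.Dict.getD_of_not_contains
    rw [PySem.Dict.contains_eq_decide_mem_keys]
    simp [hm]

/-- the cumulative sums of the lookups over a range are B's per-timestamp sums. -/
theorem cum_eq_map (d : PySem.Dict Int Int) (hnd : d.keys.Nodup) :
    ∀ (n : Nat) (t0 : Int), 1 ≤ t0 →
    pvCum ((d.items.map (fun kv => if 0 < kv.1 ∧ kv.1 ≤ t0 - 1 then kv.2 else 0)).sum)
        ((PySem.List.pyRange t0 (t0 + n) 1).map (fun t => d.getD t 0))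
      = (PySem.List.pyRange t0 (t0 + n) 1).map (fun t =>
          (d.items.map (fun kv => if 0 < kv.1 ∧ kv.1 ≤ t then kv.2 else 0)).sum) := by
  intro n
  induction n with
  | zero => intro t0 _; simp [PySem.List.pyRange_one_eq_nil, pvCum]
  | succ m ih =>
    intro t0 ht0
    have hlt : t0 < t0 + ((m : Int) + 1) := by omega
    have hcast : (((m + 1 : Nat)) : Int) = (m : Int) + 1 := by push_cast; ring
    rw [hcast, PySem.List.pyRange_one_cons hlt]
    simp only [List.map_cons, pvCum]
    have hstep : (d.items.map (fun kv => if 0 < kv.1 ∧ kv.1 ≤ t0 - 1 then kv.2 else 0)).sum + d.getD t0 0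
        = (d.items.map (fun kv => if 0 < kv.1 ∧ kv.1 ≤ t0 then kv.2 else 0)).sum := by
      rw [sum_pred_step d.items t0 ht0, sum_eq_key d hnd t0]
    rw [hstep]
    have harg : t0 + ((m : Int) + 1) = (t0 + 1) + (m : Int) := by ring
    rw [harg]
    have ih' := ih (t0 + 1) (by omega)
    have he : t0 + 1 - 1 = t0 := by ring
    rw [he] at ih'
    rw [ih']

/-- last element via pyGetD (-1) equals head of the reverse, on nonempty lists. -/
theorem last_eq_rev_head (xs : List Int) (h : xs ≠ []) :
    PySem.List.pyGetD xs (-1) 0 = xs.reverse.headD 0 := by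
  rw [PySem.List.pyGetD_neg_one xs 0 h, List.getLast_eq_head_reverse]
  rw [List.headD_eq_head?, List.head?_eq_some_head (by simpa using h)]
  rfl

-- ===== VERDICT (by name: the statement is the Claim_ definition above) =====
theorem fill_dict_spec : Claim_equal_fill_dict := by
  intro mods _
  unfold Spec_fill_dict fill_dict fill_dict_alt
  set d := PySem.Dict.ofList mods with hd
  have hnd : d.keys.Nodup := PySem.Dict.nodup_keys_ofList mods
  have hkeys : d.keys.length = d.items.length := by simp [PySem.Dict.keys]
  by_cases h : d.items.length = 0
  · simp [hkeys, h]
  · have hkne : d.keys ≠ [] := by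
      intro hc; apply h; rw [← hkeys, hc]; rfl
    have hL : PySem.List.pyGetD d.keys (-1) 0 = d.keys.reverse.headD 0 :=
      last_eq_rev_head _ hkne
    simp only [hkeys, h, beq_iff_eq, hL]
    set L := d.keys.reverse.headD 0 with hLdef
    rw [aLoop_eq]
    simp only [List.nil_append]
    have hmap : ∀ t : Int,
        d.items.foldl (fun s kv => if 0 < kv.1 ∧ kv.1 ≤ t then s + kv.2 else s) 0
          = (d.items.map (fun kv => if 0 < kv.1 ∧ kv.1 ≤ t then kv.2 else 0)).sum := by
      intro t; rw [bFold_eq_sum]; ring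
    by_cases hL1 : L ≤ 1
    · rw [PySem.List.pyRange_one_eq_nil hL1]
      simp [pvCum]
    · have hLn : L = 1 + ((L - 1).toNat : Int) := by omega
      have hcum := cum_eq_map d hnd (L - 1).toNat 1 (by omega)
      rw [← hLn] at hcum
      have hz : ((d.items.map (fun kv => if 0 < kv.1 ∧ kv.1 ≤ (1:Int) - 1 then kv.2 else 0)).sum) = 0 := by
        have : ∀ kv : Int × Int, (if 0 < kv.1 ∧ kv.1 ≤ (1:Int) - 1 then kv.2 else 0) = 0 := by
          intro kv; rw [if_neg (by omega)]
        simp only [this]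
        simp
      rw [hz] at hcum
      rw [hcum]
      simp only [hmap]
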